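-- pv_equiv track=rewrite | github.com/Laksh8/competitive-programming | Codechef/contest/Squared Subsequences.py | subSequence
-- ===== SOURCE A (Python) =====
-- def subSequence(lst,n):
--     count = 0
--     for i in range(n):
--         val = 1
--         for j in range(i,n):
--             val *=lst[j]
--             if (val)%4 != 2:
--                 count +=1
--     return count
-- ===== SOURCE B (Python) =====
-- def subSequence(lst, n):
--     # counts of start indices i (for the current end j) by product(lst[i..j]) % 4,
--     # so each step is O(1): O(n) total instead of A's O(n^2)
--     c0 = c1 = c2 = c3 = 0
--     ans = 0
--     for j in range(n):
--         x = lst[j] % 4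
--         if x == 0:
--             c0, c1, c2, c3 = c0 + c1 + c2 + c3 + 1, 0, 0, 0
--         elif x == 1:
--             c1 += 1
--         elif x == 2:
--             c0, c1, c2, c3 = c0 + c2, 0, c1 + c3 + 1, 0
--         else:
--             c1, c3 = c3, c1 + 1
--         ans += c0 + c1 + c3
--     return ans
-- ===== Notes on version B (the rewrite author's own statement) =====
-- stated objective: faster
-- what changed: Instead of A's nested loops recomputing running products for every start index, B does one linear scan keeping four counters (how many start indices give a running product congruent to 0,1,2,3 mod 4) and adds the non-2 count at each step.
import Mathlib
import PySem

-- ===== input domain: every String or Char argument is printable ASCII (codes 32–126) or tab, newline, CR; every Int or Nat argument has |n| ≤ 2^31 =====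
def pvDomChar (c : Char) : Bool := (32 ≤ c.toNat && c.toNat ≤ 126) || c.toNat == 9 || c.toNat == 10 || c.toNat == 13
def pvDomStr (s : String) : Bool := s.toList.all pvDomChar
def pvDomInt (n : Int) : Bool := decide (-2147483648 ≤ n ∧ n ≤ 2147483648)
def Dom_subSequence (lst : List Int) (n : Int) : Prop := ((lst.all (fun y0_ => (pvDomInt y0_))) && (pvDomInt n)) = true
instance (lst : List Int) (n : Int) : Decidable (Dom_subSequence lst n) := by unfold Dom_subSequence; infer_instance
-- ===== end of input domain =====

-- B replaces A's quadratic nested loops by one linear scan keeping, for the current end index,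
-- the counts of start indices whose running product is ≡ 0,1,2,3 (mod 4).

-- ===== PORT A =====
def subSequence (lst : List Int) (n : Int) : Int :=
  (PySem.List.pyRange 0 n 1).foldl (fun count i =>
    ((PySem.List.pyRange i n 1).foldl
      (fun (p : Int × Int) j =>
        let val := p.1 * PySem.List.pyGetD lst j 0   -- lst[j]; IndexError excluded by Pre_
        (val, if PySem.Int.mod val 4 ≠ 2 then p.2 + 1 else p.2))
      (1, count)).2) 0

-- ===== PORT B =====
def subSequence_alt (lst : List Int) (n : Int) : Int :=
  ((PySem.List.pyRange 0 n 1).foldl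
    (fun (st : Int × Int × Int × Int × Int) j =>
      let (c0, c1, c2, c3, ans) := st
      let x := PySem.Int.mod (PySem.List.pyGetD lst j 0) 4   -- lst[j] % 4; IndexError excluded by Pre_
      let (c0, c1, c2, c3) :=
        if x = 0 then (c0 + c1 + c2 + c3 + 1, 0, 0, 0)
        else if x = 1 then (c0, c1 + 1, c2, c3)
        else if x = 2 then (c0 + c2, 0, c1 + c3 + 1, 0)
        else (c0, c3, c2, c1 + 1)
      (c0, c1, c2, c3, ans + (c0 + c1 + c3)))
    (0, 0, 0, 0, 0)).2.2.2.2

-- ===== PRECONDITION & SPEC =====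
-- Pre_ excludes exactly n > len(lst), where A (and B) raise IndexError on lst[j].
def Pre_subSequence (lst : List Int) (n : Int) : Prop := n ≤ (lst.length : Int)
instance (lst : List Int) (n : Int) : Decidable (Pre_subSequence lst n) := by
  unfold Pre_subSequence; infer_instance

def pvWitness_subSequence : List Int × Int := ([3, -6, 4, 0, 7, 2], 6)

def Spec_subSequence (lst : List Int) (n : Int) (out : Int) : Prop := out = subSequence_alt lst n
instance (lst : List Int) (n : Int) (out : Int) : Decidable (Spec_subSequence lst n out) := by
  unfold Spec_subSequence; infer_instance

-- ===== CLAIM (what is proved, stated in full; the proofs are below) =====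
def Claim_equal_subSequence : Prop := ∀ (lst : List Int) (n : Int), Dom_subSequence lst n → Pre_subSequence lst n → Spec_subSequence lst n (subSequence lst n)

-- ===== LEMMAS AND PROOFS =====

-- Reference functions on the effective prefix xs = lst[:n].
-- cntFrom v ys = number of prefixes of ys whose product, times v, is not ≡ 2 (mod 4)
def cntFrom (v : Int) : List Int → Int
  | [] => 0
  | x :: ys => (if (v * x) % 4 ≠ 2 then 1 else 0) + cntFrom (v * x) ys

-- total count of counted (i, j) pairs, summed per start index i (A's shape)
def tCount (xs : List Int) : Int :=
  ((List.range xs.length).map (fun k => cntFrom 1 (xs.drop k))).sum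

-- products of all nonempty suffixes of xs
def suffP (xs : List Int) : List Int :=
  (List.range xs.length).map (fun k => (xs.drop k).prod)

-- how many elements of S are ≡ r (mod 4)
def resN (S : List Int) (r : Int) : Int :=
  (S.countP (fun p => decide (p % 4 = r)) : Int)

-- the pure core of B's loop body
def bstep (st : Int × Int × Int × Int × Int) (x : Int) : Int × Int × Int × Int × Int :=
  let (c0, c1, c2, c3, ans) := st
  let xm := PySem.Int.mod x 4
  let (c0', c1', c2', c3') :=
    if xm = 0 then (c0 + c1 + c2 + c3 + 1, 0, 0, 0)
    else if xm = 1 then (c0, c1 + 1, c2, c3)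
    else if xm = 2 then (c0 + c2, 0, c1 + c3 + 1, 0)
    else (c0, c3, c2, c1 + 1)
  (c0', c1', c2', c3', ans + (c0' + c1' + c3'))

-- A's inner loop computes (v * product, count + cntFrom v ys)
lemma foldA_spec (ys : List Int) : ∀ (v c : Int),
    ys.foldl (fun (p : Int × Int) x =>
        (p.1 * x, if PySem.Int.mod (p.1 * x) 4 ≠ 2 then p.2 + 1 else p.2)) (v, c)
      = (v * ys.prod, c + cntFrom v ys) := by
  induction ys with
  | nil => intro v c; simp [cntFrom]
  | cons x ys ih =>
    intro v c
    simp only [List.foldl_cons]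
    rw [ih]
    have hm : PySem.Int.mod (v * x) 4 = (v * x) % 4 := PySem.Int.mod_eq_emod_of_pos (by norm_num)
    simp only [cntFrom, List.prod_cons, hm, Prod.mk.injEq]
    constructor
    · ring
    · split_ifs <;> ring

lemma cntFrom_append (x : Int) : ∀ (ys : List Int) (v : Int),
    cntFrom v (ys ++ [x]) = cntFrom v ys + (if (v * ys.prod * x) % 4 ≠ 2 then 1 else 0) := by
  intro ys
  induction ys with
  | nil => intro v; simp [cntFrom]
  | cons y ys ih =>
    intro v
    have h : v * y * ys.prod * x = v * (y * ys.prod) * x := by ring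
    simp only [List.cons_append, cntFrom, ih (v * y), List.prod_cons, h]
    exact (add_assoc _ _ _).symm

lemma suffP_append (xs : List Int) (x : Int) :
    suffP (xs ++ [x]) = (suffP xs).map (· * x) ++ [x] := by
  simp only [suffP, List.length_append, List.length_singleton, List.range_succ, List.map_append,
    List.map_map, List.map_singleton]
  congr 1
  · apply List.map_congr_left
    intro k hk
    have hk' : k ≤ xs.length := le_of_lt (List.mem_range.mp hk)
    simp [List.drop_append_of_le_length hk']
  · rw [List.drop_append_of_le_length (le_refl _)]
    simp

lemma tCount_append (xs : List Int) (x : Int) :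
    tCount (xs ++ [x]) = tCount xs + ((suffP (xs ++ [x])).countP (fun p => !decide (p % 4 = 2)) : Int) := by
  rw [suffP_append]
  unfold tCount
  rw [List.length_append, List.length_singleton, List.range_succ, List.map_append, List.sum_append]
  have h1 : ∀ k ∈ List.range xs.length,
      cntFrom 1 ((xs ++ [x]).drop k) = cntFrom 1 (xs.drop k) + (if ((xs.drop k).prod * x) % 4 ≠ 2 then 1 else 0) := by
    intro k hk
    rw [List.drop_append_of_le_length (le_of_lt (List.mem_range.mp hk)), cntFrom_append]
    simp
  rw [List.map_congr_left h1, PySem.List.sum_map_add_int]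
  have h2 : List.map (fun k => cntFrom 1 ((xs ++ [x]).drop k)) [xs.length] = [cntFrom 1 [x]] := by
    rw [List.map_singleton, List.drop_append_of_le_length (le_refl _), List.drop_length]
    simp
  rw [h2]
  rw [List.countP_append, List.countP_map]
  have h3 : (List.map (fun k => if ((xs.drop k).prod * x) % 4 ≠ 2 then (1:Int) else 0) (List.range xs.length)).sum
      = ((suffP xs).countP ((fun p => !decide (p % 4 = 2)) ∘ (· * x)) : Int) := by
    unfold suffP
    rw [List.countP_map]
    rw [← PySem.List.sum_map_ite_one_zero (((fun p => !decide (p % 4 = 2)) ∘ (· * x)) ∘ fun k => ((xs.drop k).prod)) (List.range xs.length)]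
    apply congrArg
    apply List.map_congr_left
    intro k hk
    simp only [Function.comp]
    split_ifs with hA hB hB <;> simp_all
  rw [h3]
  push_cast
  simp [cntFrom]
  split_ifs <;> ring

lemma resN_not_two (S : List Int) :
    resN S 0 + resN S 1 + resN S 3 = (S.countP (fun p => !decide (p % 4 = 2)) : Int) := by
  induction S with
  | nil => simp [resN]
  | cons p S ih =>
    have h1 : 0 ≤ p % 4 := Int.emod_nonneg p (by norm_num)
    have h2 : p % 4 < 4 := Int.emod_lt_of_pos p (by norm_num)
    simp only [resN, List.countP_cons] at *
    push_cast at *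
    split_ifs <;> simp_all <;> omega

lemma resN_append_single (S : List Int) (x r : Int) :
    resN (S ++ [x]) r = resN S r + (if x % 4 = r then 1 else 0) := by
  unfold resN
  rw [List.countP_append]
  push_cast
  congr 1
  by_cases hx : x % 4 = r <;> simp [hx]

lemma resN_map_residue (S : List Int) (x r : Int) :
    resN (S.map (· * x)) r =
      (if (0 * (x % 4)) % 4 = r then resN S 0 else 0) +
      (if (1 * (x % 4)) % 4 = r then resN S 1 else 0) +
      (if (2 * (x % 4)) % 4 = r then resN S 2 else 0) +
      (if (3 * (x % 4)) % 4 = r then resN S 3 else 0) := by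
  induction S with
  | nil => simp [resN]
  | cons p S ih =>
    have h1 : 0 ≤ p % 4 := Int.emod_nonneg p (by norm_num)
    have h2 : p % 4 < 4 := Int.emod_lt_of_pos p (by norm_num)
    have hm : (p * x) % 4 = (p % 4 * (x % 4)) % 4 := by rw [Int.mul_emod]
    simp only [List.map_cons, resN, List.countP_cons] at *
    push_cast at *
    rcases (by omega : p % 4 = 0 ∨ p % 4 = 1 ∨ p % 4 = 2 ∨ p % 4 = 3) with ha | ha | ha | ha <;>
      rw [hm, ha] <;> simp_all <;> split_ifs <;> omega

lemma bfold_invariant (xs : List Int) :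
    xs.foldl bstep (0, 0, 0, 0, 0)
      = (resN (suffP xs) 0, resN (suffP xs) 1, resN (suffP xs) 2, resN (suffP xs) 3, tCount xs) := by
  induction xs using List.reverseRecOn with
  | nil => simp [suffP, tCount, resN]
  | append_singleton xs x ih =>
    rw [List.foldl_append, ih, List.foldl_cons, List.foldl_nil]
    have hm : PySem.Int.mod x 4 = x % 4 := PySem.Int.mod_eq_emod_of_pos (by norm_num)
    have hx0 : 0 ≤ x % 4 := Int.emod_nonneg x (by norm_num)
    have hx4 : x % 4 < 4 := Int.emod_lt_of_pos x (by norm_num)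
    rw [tCount_append, suffP_append]
    have hnot2 := resN_not_two ((suffP xs).map (· * x) ++ [x])
    unfold bstep
    simp only [hm]
    rcases (by omega : x % 4 = 0 ∨ x % 4 = 1 ∨ x % 4 = 2 ∨ x % 4 = 3) with h | h | h | h
    · have E0 : resN ((suffP xs).map (· * x) ++ [x]) 0
          = resN (suffP xs) 0 + resN (suffP xs) 1 + resN (suffP xs) 2 + resN (suffP xs) 3 + 1 := by
        rw [resN_append_single, resN_map_residue, h]; split_ifs <;> omega
      have E1 : resN ((suffP xs).map (· * x) ++ [x]) 1 = 0 := by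
        rw [resN_append_single, resN_map_residue, h]; split_ifs <;> omega
      have E2 : resN ((suffP xs).map (· * x) ++ [x]) 2 = 0 := by
        rw [resN_append_single, resN_map_residue, h]; split_ifs <;> omega
      have E3 : resN ((suffP xs).map (· * x) ++ [x]) 3 = 0 := by
        rw [resN_append_single, resN_map_residue, h]; split_ifs <;> omega
      rw [h, ← hnot2]
      norm_num
      and_intros <;> omega
    · have E0 : resN ((suffP xs).map (· * x) ++ [x]) 0 = resN (suffP xs) 0 := by
        rw [resN_append_single, resN_map_residue, h]; split_ifs <;> omega
      have E1 : resN ((suffP xs).map (· * x) ++ [x]) 1 = resN (suffP xs) 1 + 1 := by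
        rw [resN_append_single, resN_map_residue, h]; split_ifs <;> omega
      have E2 : resN ((suffP xs).map (· * x) ++ [x]) 2 = resN (suffP xs) 2 := by
        rw [resN_append_single, resN_map_residue, h]; split_ifs <;> omega
      have E3 : resN ((suffP xs).map (· * x) ++ [x]) 3 = resN (suffP xs) 3 := by
        rw [resN_append_single, resN_map_residue, h]; split_ifs <;> omega
      rw [h, ← hnot2]
      norm_num
      and_intros <;> omega
    · have E0 : resN ((suffP xs).map (· * x) ++ [x]) 0 = resN (suffP xs) 0 + resN (suffP xs) 2 := by
        rw [resN_append_single, resN_map_residue, h]; split_ifs <;> omega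
      have E1 : resN ((suffP xs).map (· * x) ++ [x]) 1 = 0 := by
        rw [resN_append_single, resN_map_residue, h]; split_ifs <;> omega
      have E2 : resN ((suffP xs).map (· * x) ++ [x]) 2 = resN (suffP xs) 1 + resN (suffP xs) 3 + 1 := by
        rw [resN_append_single, resN_map_residue, h]; split_ifs <;> omega
      have E3 : resN ((suffP xs).map (· * x) ++ [x]) 3 = 0 := by
        rw [resN_append_single, resN_map_residue, h]; split_ifs <;> omega
      rw [h, ← hnot2]
      norm_num
      and_intros <;> omega
    · have E0 : resN ((suffP xs).map (· * x) ++ [x]) 0 = resN (suffP xs) 0 := by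
        rw [resN_append_single, resN_map_residue, h]; split_ifs <;> omega
      have E1 : resN ((suffP xs).map (· * x) ++ [x]) 1 = resN (suffP xs) 3 := by
        rw [resN_append_single, resN_map_residue, h]; split_ifs <;> omega
      have E2 : resN ((suffP xs).map (· * x) ++ [x]) 2 = resN (suffP xs) 2 := by
        rw [resN_append_single, resN_map_residue, h]; split_ifs <;> omega
      have E3 : resN ((suffP xs).map (· * x) ++ [x]) 3 = resN (suffP xs) 1 + 1 := by
        rw [resN_append_single, resN_map_residue, h]; split_ifs <;> omega
      rw [h, ← hnot2]
      norm_num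
      and_intros <;> omega

lemma main_eq (lst : List Int) (n : Int) (hn : n ≤ (lst.length : Int)) :
    subSequence lst n = subSequence_alt lst n := by
  by_cases h0 : 0 ≤ n
  · set xs := lst.take n.toNat with hxs
    have hlenN : xs.length = n.toNat := by
      simp [hxs]
      omega
    have hlen : (xs.length : Int) = n := by
      rw [hlenN]; omega
    have hget : ∀ j : Int, 0 ≤ j → j < (xs.length : Int) →
        PySem.List.pyGetD lst j 0 = PySem.List.pyGetD xs j 0 := by
      intro j hj1 hj2
      have hjx : j.toNat < xs.length := by omega
      have hjl : j.toNat < lst.length := by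
        have := List.length_take_le n.toNat lst
        omega
      rw [PySem.List.pyGetD_eq_getElem lst 0 hj1 (by exact_mod_cast (by omega : j < (lst.length : Int))),
          PySem.List.pyGetD_eq_getElem xs 0 hj1 hj2]
      exact (List.getElem_take).symm
    have hB : subSequence_alt lst n = (xs.foldl bstep (0, 0, 0, 0, 0)).2.2.2.2 := by
      unfold subSequence_alt
      rw [← hlen]
      rw [PySem.List.foldl_congr_mem _ _ (fun st j => bstep st (PySem.List.pyGetD xs j 0)) _ ?_]
      · rw [PySem.List.foldl_pyRange_zero_pyGetD']
      · intro st j hj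
        have hj' := PySem.List.mem_pyRange_one.mp hj
        rw [hget j hj'.1 hj'.2]
        rfl
    have hA : subSequence lst n = tCount xs := by
      unfold subSequence
      rw [← hlen]
      rw [PySem.List.foldl_congr_mem _ _ (fun count i => count + cntFrom 1 (xs.drop i.toNat)) _ ?_]
      · rw [PySem.List.foldl_add]
        rw [PySem.List.pyRange_one]
        simp only [List.map_map, zero_add, Int.sub_zero, Int.toNat_natCast]
        unfold tCount
        congr 1
      · intro count i hi
        have hi' := PySem.List.mem_pyRange_one.mp hi
        rw [PySem.List.foldl_congr_mem _ _
            (fun (p : Int × Int) j =>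
              (fun (q : Int × Int) (v : Int) =>
                (q.1 * v, if PySem.Int.mod (q.1 * v) 4 ≠ 2 then q.2 + 1 else q.2)) p
                (PySem.List.pyGetD xs j 0)) _ ?_]
        · rw [PySem.List.foldl_pyRange_pyGetD' xs 0
            (fun (q : Int × Int) (v : Int) =>
                (q.1 * v, if PySem.Int.mod (q.1 * v) 4 ≠ 2 then q.2 + 1 else q.2)) (1, count) hi'.1]
          rw [foldA_spec]
        · intro p j hj
          have hj' := PySem.List.mem_pyRange_one.mp hj
          rw [hget j (by omega) hj'.2]
    rw [hA, hB, bfold_invariant]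
  · have hempty : PySem.List.pyRange 0 n 1 = [] := PySem.List.pyRange_one_eq_nil (by omega)
    unfold subSequence subSequence_alt
    rw [hempty]
    rfl

-- ===== VERDICT (by name: the statement is the Claim_ definition above) =====
theorem subSequence_spec : Claim_equal_subSequence := by
  intro lst n _ hpre
  unfold Spec_subSequence
  exact main_eq lst n hpre
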